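-- pv_equiv track=rewrite | github.com/hebelmx/Veriqan | Prisma/scripts/archive/dependency-old-versions/analyze_test_dependencies.py | _categorize_project
-- ===== SOURCE A (Python) =====
-- from typing import Set, List, Dict, Tuple
--
-- def _categorize_project(references: List[str]) -> str:
--     """Categorize project based on its references."""
--     if any("Infrastructure" in ref or "Axis" in ref or "Datastream" in ref for ref in references):
--         return "Infrastructure"
--     elif any("Api" in ref for ref in references):
--         return "Api"
--     elif any("Application" in ref for ref in references):
--         return "Application"
--     elif any("Domain" in ref for ref in references):
--         return "Domain"
--     elif len(references) > 3:
--         return "Integration"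
--     else:
--         return "Domain"  # Default to most restrictive
-- ===== SOURCE B (Python) =====
-- from typing import List
--
-- def _categorize_project(references: List[str]) -> str:
--     """Categorize project based on its references (single pass over references)."""
--     infra = api = app = dom = False
--     for ref in references:
--         infra = infra or "Infrastructure" in ref or "Axis" in ref or "Datastream" in ref
--         api = api or "Api" in ref
--         app = app or "Application" in ref
--         dom = dom or "Domain" in ref
--     if infra:
--         return "Infrastructure"
--     if api:
--         return "Api"
--     if app:
--         return "Application"
--     if dom:
--         return "Domain"
--     if len(references) > 3:
--         return "Integration"
--     return "Domain"
-- ===== Notes on version B (the rewrite author's own statement) =====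
-- stated objective: alternative
-- what changed: Replaces four separate short-circuit any() scans with one pass over the references that accumulates four boolean flags, then decides by the same priority chain.
import Mathlib
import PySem

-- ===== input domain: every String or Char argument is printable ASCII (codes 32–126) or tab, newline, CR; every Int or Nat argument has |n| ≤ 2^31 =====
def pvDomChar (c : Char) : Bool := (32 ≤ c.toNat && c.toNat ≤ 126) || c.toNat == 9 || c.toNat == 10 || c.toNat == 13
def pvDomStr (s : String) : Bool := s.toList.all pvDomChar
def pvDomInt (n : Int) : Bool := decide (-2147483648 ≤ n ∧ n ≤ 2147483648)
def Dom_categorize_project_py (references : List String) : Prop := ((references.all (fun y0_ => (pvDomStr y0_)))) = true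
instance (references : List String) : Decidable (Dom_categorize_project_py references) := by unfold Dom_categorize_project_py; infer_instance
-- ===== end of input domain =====

-- B replaces A's four separate short-circuit scans by one pass accumulating four flags; same result (objective: alternative).

-- ===== PORT A =====
def categorize_project_py (references : List String) : String :=
  if references.any (fun ref =>
      PySem.Str.isIn "Infrastructure" ref || PySem.Str.isIn "Axis" ref || PySem.Str.isIn "Datastream" ref) then
    "Infrastructure"
  else if references.any (fun ref => PySem.Str.isIn "Api" ref) then "Api"
  else if references.any (fun ref => PySem.Str.isIn "Application" ref) then "Application"
  else if references.any (fun ref => PySem.Str.isIn "Domain" ref) then "Domain"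
  else if references.length > 3 then "Integration"
  else "Domain"

-- ===== PORT B =====
def categorize_project_py_alt (references : List String) : String :=
  let flags := references.foldl
    (fun (f : Bool × Bool × Bool × Bool) ref =>
      (f.1 || PySem.Str.isIn "Infrastructure" ref || PySem.Str.isIn "Axis" ref || PySem.Str.isIn "Datastream" ref,
       f.2.1 || PySem.Str.isIn "Api" ref,
       f.2.2.1 || PySem.Str.isIn "Application" ref,
       f.2.2.2 || PySem.Str.isIn "Domain" ref))
    (false, false, false, false)
  if flags.1 then "Infrastructure"
  else if flags.2.1 then "Api"
  else if flags.2.2.1 then "Application"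
  else if flags.2.2.2 then "Domain"
  else if references.length > 3 then "Integration"
  else "Domain"

-- ===== PRECONDITION & SPEC =====
def Spec_categorize_project_py (references : List String) (out : String) : Prop := out = categorize_project_py_alt references
instance (references : List String) (out : String) : Decidable (Spec_categorize_project_py references out) := by unfold Spec_categorize_project_py; infer_instance

-- ===== CLAIM (what is proved, stated in full; the proofs are below) =====
def Claim_equal_categorize_project_py : Prop := ∀ (references : List String), Dom_categorize_project_py references → Spec_categorize_project_py references (categorize_project_py references)

-- ===== LEMMAS AND PROOFS =====
theorem flags_foldl_eq (l : List String) (p1 p2 p3 p4 : String → Bool) (a b c d : Bool) :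
    l.foldl (fun (f : Bool × Bool × Bool × Bool) ref =>
      (f.1 || p1 ref, f.2.1 || p2 ref, f.2.2.1 || p3 ref, f.2.2.2 || p4 ref)) (a, b, c, d)
    = (a || l.any p1, b || l.any p2, c || l.any p3, d || l.any p4) := by
  induction l generalizing a b c d with
  | nil => simp
  | cons x xs ih =>
    simp only [List.foldl_cons, List.any_cons, ih]
    simp [Bool.or_assoc]

-- ===== VERDICT (by name: the statement is the Claim_ definition above) =====
theorem categorize_project_py_spec : Claim_equal_categorize_project_py := by
  intro references _
  unfold Spec_categorize_project_py categorize_project_py categorize_project_py_alt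
  rw [show (fun (f : Bool × Bool × Bool × Bool) ref =>
      (f.1 || PySem.Str.isIn "Infrastructure" ref || PySem.Str.isIn "Axis" ref || PySem.Str.isIn "Datastream" ref,
       f.2.1 || PySem.Str.isIn "Api" ref,
       f.2.2.1 || PySem.Str.isIn "Application" ref,
       f.2.2.2 || PySem.Str.isIn "Domain" ref))
    = (fun (f : Bool × Bool × Bool × Bool) ref =>
      (f.1 || (PySem.Str.isIn "Infrastructure" ref || PySem.Str.isIn "Axis" ref || PySem.Str.isIn "Datastream" ref),
       f.2.1 || PySem.Str.isIn "Api" ref,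
       f.2.2.1 || PySem.Str.isIn "Application" ref,
       f.2.2.2 || PySem.Str.isIn "Domain" ref)) from by
      funext f ref; simp [Bool.or_assoc]]
  rw [flags_foldl_eq]
  simp
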